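-- pv_equiv track=rewrite | github.com/panda-34/epibook.github.io | solutions/python/add_operators_in_string.py | evaluate
-- ===== SOURCE A (Python) =====
-- def evaluate(operands, operators):
--     intermediate_operands = []
--     operand_it = iter(operands)
--     intermediate_operands.append(next(operand_it))
--     # Evaluates '*' first.
--     for oper in operators:
--         if oper == '*':
--             product = intermediate_operands[-1] * next(operand_it)
--             intermediate_operands[-1] = product
--         else:  # oper == '+'.
--             intermediate_operands.append(next(operand_it))
--
--     # Evaluates '+' second.
--     return sum(intermediate_operands)
-- ===== SOURCE B (Python) =====
-- def evaluate(operands, operators):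
--     # Recursive rewriting evaluator: repeatedly reduce the leftmost operator.
--     # '*' binds tighter, so folding it into the operand list first is sound;
--     # on '+' everything to the right is an independent subexpression.
--     if not operators:
--         return operands[0]
--     if operators[0] == '*':
--         return evaluate([operands[0] * operands[1]] + operands[2:], operators[1:])
--     return operands[0] + evaluate(operands[1:], operators[1:])
-- ===== Notes on version B (the rewrite author's own statement) =====
-- stated objective: alternative
-- what changed: Replaces the iterator-driven loop that maintains a list of intermediate terms and sums it with a recursive rewriting evaluator that reduces the leftmost operator each step ('*' folds the product back into the operand list, '+' splits off an independent subexpression).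
import Mathlib
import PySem

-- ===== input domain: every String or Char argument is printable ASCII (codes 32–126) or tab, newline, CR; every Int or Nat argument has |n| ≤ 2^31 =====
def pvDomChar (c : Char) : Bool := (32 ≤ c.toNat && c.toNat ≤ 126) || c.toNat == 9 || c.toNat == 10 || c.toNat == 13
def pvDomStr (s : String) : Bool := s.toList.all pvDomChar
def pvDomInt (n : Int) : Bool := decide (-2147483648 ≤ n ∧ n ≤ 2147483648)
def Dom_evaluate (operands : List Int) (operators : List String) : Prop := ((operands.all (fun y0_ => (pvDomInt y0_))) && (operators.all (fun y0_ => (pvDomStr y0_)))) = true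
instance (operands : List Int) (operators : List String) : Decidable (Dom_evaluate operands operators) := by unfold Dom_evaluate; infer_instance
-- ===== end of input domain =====

-- B replaces A's iterator loop over a list of intermediate terms (+ trailing sum) with a
-- recursive rewriting evaluator reducing the leftmost operator each step (objective: alternative).


-- ===== PORT A =====
-- Loop state: (intermediate_operands kept in REVERSED order so the head is the
-- Python list's last element, remaining operands of the iterator); none = StopIteration.
def evalAStep (st : Option (List Int × List Int)) (oper : String) : Option (List Int × List Int) :=
  match st with
  | none => none
  | some (ints, rest) =>
    if oper = "*" then
      match ints, rest with
      | h :: t, x :: r => some ((h * x) :: t, r)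
      | _, _ => none
    else
      match rest with
      | x :: r => some (x :: ints, r)
      | [] => none

def evaluate (operands : List Int) (operators : List String) : Int :=
  match operands with
  | [] => 0  -- next(operand_it) raises StopIteration; excluded by Pre_evaluate
  | x :: rest =>
    ((operators.foldl evalAStep (some ([x], rest))).map (fun st => st.1.sum)).getD 0

-- ===== PORT B =====
def evaluate_alt (operands : List Int) (operators : List String) : Int :=
  match operators, operands with
  | [], a :: _ => a
  | op :: rest, a :: b :: t =>
    if op = "*" then evaluate_alt ((a * b) :: t) rest
    else a + evaluate_alt (b :: t) rest
  | _, _ => 0  -- Python B raises IndexError here; excluded by Pre_evaluate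

-- ===== PRECONDITION & SPEC =====
-- Pre_ excludes exactly the inputs where the Python A raises StopIteration
-- (the loop consumes one operand per operator plus one up front); Python B
-- raises IndexError on the same inputs.
def Pre_evaluate (operands : List Int) (operators : List String) : Prop :=
  operators.length + 1 ≤ operands.length
instance (operands : List Int) (operators : List String) : Decidable (Pre_evaluate operands operators) := by unfold Pre_evaluate; infer_instance
def pvWitness_evaluate : List Int × List String := ([1, 2, 3], ["+", "*"])

def Spec_evaluate (operands : List Int) (operators : List String) (out : Int) : Prop := out = evaluate_alt operands operators
instance (operands : List Int) (operators : List String) (out : Int) : Decidable (Spec_evaluate operands operators out) := by unfold Spec_evaluate; infer_instance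

-- ===== CLAIM (what is proved, stated in full; the proofs are below) =====
def Claim_equal_evaluate : Prop := ∀ (operands : List Int) (operators : List String), Dom_evaluate operands operators → Pre_evaluate operands operators → Spec_evaluate operands operators (evaluate operands operators)

-- ===== LEMMAS AND PROOFS =====
-- Invariant of A's loop: with completed terms tl (reversed) and current term cur,
-- the final sum equals tl.sum plus B's value on the remaining stream.
lemma evalA_evalB (ops : List String) : ∀ (cur : Int) (tl rest : List Int),
    ops.length ≤ rest.length →
    ((ops.foldl evalAStep (some (cur :: tl, rest))).map (fun st => st.1.sum)).getD 0
      = tl.sum + evaluate_alt (cur :: rest) ops := by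
  induction ops with
  | nil =>
    intro cur tl rest _
    simp [evaluate_alt, List.sum_cons]; ring
  | cons op ops ih =>
    intro cur tl rest hlen
    cases rest with
    | nil => simp at hlen
    | cons x r =>
      simp only [List.length_cons, Nat.add_le_add_iff_right] at hlen
      by_cases hop : op = "*"
      · simp only [List.foldl_cons, evalAStep, hop, evaluate_alt]
        exact ih (cur * x) tl r hlen
      · simp only [List.foldl_cons, evalAStep, if_neg hop, evaluate_alt]
        rw [ih x (cur :: tl) r hlen]
        simp [List.sum_cons]; ring

-- ===== VERDICT (by name: the statement is the Claim_ definition above) =====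
theorem evaluate_spec : Claim_equal_evaluate := by
  intro operands operators _ hpre
  unfold Spec_evaluate
  cases operands with
  | nil => simp [Pre_evaluate] at hpre
  | cons x rest =>
    simp only [evaluate]
    rw [evalA_evalB operators x [] rest (by simpa [Pre_evaluate] using hpre)]
    simp
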